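-- pv_equiv track=rewrite | github.com/UWPCE-PythonCert-ClassRepos/SP_Online_PY210 | students/duanez2021/lesson02/gridPrinter_part2.py | print_row
-- ===== SOURCE A (Python) =====
-- def print_row(n):
--     #print a row of +/-
--     plus = '+'
--     minus = '-'
--     row = ''
--     # if n < 3 default to 3
--     if n < 3: n = 3
--
--     i = 1  # loop counter, number of +'s
--     dash = n//2
--     for k in range(3):
--         row = row + plus
--         i = i + 1
--         if i <= 3:
--             for y in range(dash):
--                 row = row + minus
--     return row
-- ===== SOURCE B (Python) =====
-- def print_row(n):
--     # Closed form: three pluses delimiting two dash-runs of n//2 (n clamped up to 3).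
--     dash = (n if n >= 3 else 3) // 2
--     return ('+' + '-' * dash) * 2 + '+'
-- ===== Notes on version B (the rewrite author's own statement) =====
-- stated objective: simpler
-- what changed: Replaces the three-iteration outer loop with nested per-character dash loops and the counter guard by a single closed-form string-repetition expression ('+' + '-'*dash)*2 + '+'.
import Mathlib
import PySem

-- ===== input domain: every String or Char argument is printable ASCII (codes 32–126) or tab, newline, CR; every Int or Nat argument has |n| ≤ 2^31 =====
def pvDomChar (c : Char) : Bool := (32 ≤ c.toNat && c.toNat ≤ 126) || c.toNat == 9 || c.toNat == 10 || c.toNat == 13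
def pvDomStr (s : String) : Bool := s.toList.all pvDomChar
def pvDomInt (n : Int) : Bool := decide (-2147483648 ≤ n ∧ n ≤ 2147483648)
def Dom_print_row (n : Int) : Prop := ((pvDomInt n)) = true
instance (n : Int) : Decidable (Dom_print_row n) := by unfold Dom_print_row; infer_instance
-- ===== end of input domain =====

-- B replaces A's outer 3-iteration loop, nested dash loops and i<=3 counter guard by the
-- closed-form pattern ('+' + '-'*dash)*2 + '+' (objective: simpler).

-- ===== PORT A =====
-- A: builds row by appending '+' three times, and after the first two pluses appends
-- dash = n//2 minuses via an inner loop, guarded by the counter i <= 3.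
def print_row (n : Int) : String :=
  let plus := '+'
  let minus := '-'
  let row : List Char := []
  let n := if n < 3 then 3 else n
  let i : Int := 1
  let dash := PySem.Int.floordiv n 2
  let st := (PySem.List.pyRange 0 3 1).foldl (fun (st : List Char × Int) _ =>
    let row := st.1 ++ [plus]
    let i := st.2 + 1
    if i ≤ 3 then
      ((PySem.List.pyRange 0 dash 1).foldl (fun r _ => r ++ [minus]) row, i)
    else (row, i)) (row, i)
  String.ofList st.1

-- ===== PORT B =====
-- B: dash = (n if n >= 3 else 3)//2; return ('+' + '-'*dash)*2 + '+'
def print_row_alt (n : Int) : String :=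
  let dash := PySem.Int.floordiv (if n ≥ 3 then n else 3) 2
  let seg : List Char := '+' :: List.replicate dash.toNat '-'
  String.ofList (seg ++ seg ++ ['+'])

-- ===== PRECONDITION & SPEC =====
def Spec_print_row (n : Int) (out : String) : Prop := out = print_row_alt n
instance (n : Int) (out : String) : Decidable (Spec_print_row n out) := by unfold Spec_print_row; infer_instance

-- ===== CLAIM (what is proved, stated in full; the proofs are below) =====
def Claim_equal_print_row : Prop := ∀ (n : Int), Dom_print_row n → Spec_print_row n (print_row n)

-- ===== LEMMAS AND PROOFS =====

-- A's inner dash loop appends one '-' per range element.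
theorem foldl_append_minus (l : List Int) (acc : List Char) (c : Char) :
    l.foldl (fun r _ => r ++ [c]) acc = acc ++ List.replicate l.length c := by
  induction l generalizing acc with
  | nil => simp
  | cons x xs ih => simp [List.foldl, ih, List.replicate_succ]

theorem print_row_eq (n : Int) : print_row n = print_row_alt n := by
  unfold print_row print_row_alt
  have hclamp : (if n < 3 then 3 else n) = (if n ≥ 3 then n else 3) := by
    split_ifs <;> omega
  rw [hclamp]
  have h3 : PySem.List.pyRange 0 3 1 = [0, 1, 2] := by decide
  simp only [h3, List.foldl, foldl_append_minus]
  norm_num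

-- ===== VERDICT (by name: the statement is the Claim_ definition above) =====
theorem print_row_spec : Claim_equal_print_row := by
  intro n _
  unfold Spec_print_row
  exact print_row_eq n
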